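-- pv_equiv track=rewrite | github.com/wyk18703232953/myResearch | codeComplex/data/filteredData/python/linear/python_linear_0134.py | solve
-- ===== SOURCE A (Python) =====
-- def bit_count(x):
--     ans = 0
--     while x:
--         x &= x - 1
--         ans += 1
--     return ans
--
-- def solve(n_str, k):
--     x = len(n_str)
--     if n_str == '1':
--         return int(k == 0)
--     if not k:
--         return 1
--
--     mod = 10 ** 9 + 7
--
--     # dp[i] = number of times we have to apply popcount until we reach 1, starting from i
--     dp = [0] * (x + 1)
--     dp[1] = 1
--     for i in range(2, x + 1):
--         dp[i] = dp[bit_count(i)] + 1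
--
--     # dp1[length][set_bits] = C(length, set_bits) modulo mod
--     dp1 = [[0] * (x + 1) for _ in range(x + 1)]
--     for i in range(x + 1):
--         dp1[i][0] = 1
--     for i in range(1, x + 1):
--         for j in range(1, i + 1):
--             dp1[i][j] = (dp1[i - 1][j - 1] + dp1[i - 1][j]) % mod
--
--     ans = 0
--     cou = n_str.count('1')
--
--     for i in range(1, x + 1):
--         if dp[i] != k:
--             continue
--         se = i
--         for j in range(x):
--             if n_str[j] == '0':
--                 continue
--             # choose remaining 'se' ones from remaining positions
--             add_val = dp1[x - 1 - j][se]
--             if se == 1 and k == 1: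
--                 add_val -= 1
--             ans = (ans + add_val) % mod
--             se -= 1
--             if se < 0:
--                 break
--         if cou == i:
--             ans = (ans + 1) % mod
--
--     return ans
-- ===== SOURCE B (Python) =====
-- def bit_count(x):
--     ans = 0
--     while x:
--         x &= x - 1
--         ans += 1
--     return ans
--
-- def comb(n, r):
--     # exact binomial coefficient via the multiplicative formula
--     if r < 0 or r > n:
--         return 0
--     c = 1
--     for t in range(1, r + 1):
--         c = c * (n - r + t) // t
--     return c
--
-- def solve(n_str, k):
--     x = len(n_str)
--     if n_str == '1':
--         return int(k == 0)
--     if not k: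
--         return 1
--
--     mod = 10 ** 9 + 7
--
--     dp = [0] * (x + 1)
--     dp[1] = 1
--     for i in range(2, x + 1):
--         dp[i] = dp[bit_count(i)] + 1
--
--     valid = [i for i in range(1, x + 1) if dp[i] == k]
--     ones = [j for j in range(x) if n_str[j] != '0']
--
--     ans = 0
--     # one left-to-right pass over the set positions; o = ones consumed so far
--     for o in range(len(ones)):
--         j = ones[o]
--         for i in valid:
--             if i < o:
--                 continue
--             add_val = comb(x - 1 - j, i - o) % mod
--             if i - o == 1 and k == 1:
--                 add_val -= 1
--             ans = (ans + add_val) % mod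
--
--     cou = n_str.count('1')
--     for i in valid:
--         if cou == i:
--             ans = (ans + 1) % mod
--     return ans
-- ===== Notes on version B (the rewrite author's own statement) =====
-- stated objective: alternative
-- what changed: B replaces A's Pascal-triangle dp1 table and the per-depth stateful inner scan (a decrementing se counter with break and continue) by a closed-form multiplicative binomial comb(n,r) and a single left-to-right pass over the precomputed list of set positions with an inner loop over the precomputed valid depths (loop interchange), adding C(x-1-j, i-o) with the k==1 correction per pair.
import Mathlib
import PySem

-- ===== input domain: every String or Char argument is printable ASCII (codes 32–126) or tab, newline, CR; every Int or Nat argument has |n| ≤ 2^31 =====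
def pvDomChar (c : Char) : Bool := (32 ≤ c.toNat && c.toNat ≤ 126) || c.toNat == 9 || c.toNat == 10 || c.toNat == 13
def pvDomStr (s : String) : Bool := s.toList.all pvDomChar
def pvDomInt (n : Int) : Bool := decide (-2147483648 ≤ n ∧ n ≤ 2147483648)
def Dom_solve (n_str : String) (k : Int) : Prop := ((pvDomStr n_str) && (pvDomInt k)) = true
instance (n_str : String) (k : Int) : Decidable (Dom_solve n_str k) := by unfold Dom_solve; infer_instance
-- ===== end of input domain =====

-- B replaces A's Pascal-triangle table and per-depth stateful scan (se counter with break) by a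
-- closed-form multiplicative binomial and one pass over the set positions with an inner loop over
-- the valid depths; same return value on every input A accepts (objective: alternative).

-- ===== PORT A =====

-- termination fact for the 'while x: x &= x - 1' loop (cited by bit_count's decreasing_by)
theorem pv_band_pred_toNat_lt (x : Int) (h : 0 < x) :
    (PySem.Int.band x (x - 1)).toNat < x.toNat := by
  have h1 : PySem.Int.band x (x - 1) = ((x.toNat &&& (x - 1).toNat : Nat) : Int) :=
    PySem.Int.band_of_nonneg (by omega) (by omega)
  have h2 : x.toNat &&& (x - 1).toNat ≤ (x - 1).toNat := Nat.and_le_right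
  omega

-- while x: x &= x - 1; ans += 1   (Python diverges for x < 0; never called so: guard 0 < x)
def bit_count (x : Int) : Int :=
  if h : 0 < x then bit_count (PySem.Int.band x (x - 1)) + 1 else 0
termination_by x.toNat
decreasing_by exact pv_band_pred_toNat_lt x h

-- dp = [0]*(x+1); dp[1] = 1; for i in range(2, x+1): dp[i] = dp[bit_count(i)] + 1
-- (dp[1] = 1 raises IndexError in Python when x = 0: that input is outside Pre_solve)
def buildDp (x : Int) : List Int :=
  (PySem.List.pyRange 2 (x + 1) 1).foldl
    (fun dp i => PySem.List.pySetD dp i (PySem.List.pyGetD dp (bit_count i) 0 + 1))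
    (PySem.List.pySetD (PySem.List.pyRepeat [(0 : Int)] (x + 1)) 1 1)

-- inner loop 'for j in range(1, i+1): dp1[i][j] = (dp1[i-1][j-1] + dp1[i-1][j]) % mod'
def dp1Inner (t : List (List Int)) (i : Int) : List (List Int) :=
  (PySem.List.pyRange 1 (i + 1) 1).foldl
    (fun t j =>
      PySem.List.pySetD t i (PySem.List.pySetD (PySem.List.pyGetD t i []) j
        (PySem.Int.mod
          (PySem.List.pyGetD (PySem.List.pyGetD t (i - 1) []) (j - 1) 0
            + PySem.List.pyGetD (PySem.List.pyGetD t (i - 1) []) j 0) 1000000007))) t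

-- dp1 = [[0]*(x+1) for _ in range(x+1)]; for i in range(x+1): dp1[i][0] = 1
def initTbl (x : Int) : List (List Int) :=
  (PySem.List.pyRange 0 (x + 1) 1).foldl
    (fun t i => PySem.List.pySetD t i (PySem.List.pySetD (PySem.List.pyGetD t i []) 0 1))
    ((PySem.List.pyRange 0 (x + 1) 1).map (fun _ => PySem.List.pyRepeat [(0 : Int)] (x + 1)))

-- for i in range(1, x+1): <inner loop>
def buildDp1 (x : Int) : List (List Int) :=
  (PySem.List.pyRange 1 (x + 1) 1).foldl dp1Inner (initTbl x)

-- the j-loop of A's main loop, with its 'continue' on '0' and 'break' on se < 0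
-- (n_str[j] is always in range here, so the pyGetD default ' ' is never used)
def innerA (cs : List Char) (x k : Int) (dp1 : List (List Int)) :
    List Int → Int → Int → Int
  | [], ans, _se => ans
  | j :: js, ans, se =>
    if PySem.List.pyGetD cs j ' ' = '0' then innerA cs x k dp1 js ans se
    else
      let add0 := PySem.List.pyGetD (PySem.List.pyGetD dp1 (x - 1 - j) []) se 0
      let add_val := if se = 1 ∧ k = 1 then add0 - 1 else add0
      let ans' := PySem.Int.mod (ans + add_val) 1000000007
      if se - 1 < 0 then ans' else innerA cs x k dp1 js ans' (se - 1)

def solve (n_str : String) (k : Int) : Int :=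
  let x := PySem.Str.len n_str
  if n_str = "1" then (if k = 0 then 1 else 0)
  else if k = 0 then 1
  else
    let dp := buildDp x
    let dp1 := buildDp1 x
    let cou : Int := ((PySem.Str.count n_str "1" : Nat) : Int)
    (PySem.List.pyRange 1 (x + 1) 1).foldl
      (fun ans i =>
        if PySem.List.pyGetD dp i 0 ≠ k then ans
        else
          let ans1 := innerA n_str.toList x k dp1 (PySem.List.pyRange 0 x 1) ans i
          if cou = i then PySem.Int.mod (ans1 + 1) 1000000007 else ans1) 0

-- ===== PORT B =====

-- exact binomial coefficient via the multiplicative formula (Source B's comb)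
def comb (n r : Int) : Int :=
  if r < 0 ∨ n < r then 0
  else
    (PySem.List.pyRange 1 (r + 1) 1).foldl
      (fun c t => PySem.Int.floordiv (c * (n - r + t)) t) 1

def solve_alt (n_str : String) (k : Int) : Int :=
  let x := PySem.Str.len n_str
  if n_str = "1" then (if k = 0 then 1 else 0)
  else if k = 0 then 1
  else
    let dp := buildDp x
    let valid := (PySem.List.pyRange 1 (x + 1) 1).filter
      (fun i => PySem.List.pyGetD dp i 0 == k)
    let ones := (PySem.List.pyRange 0 x 1).filter
      (fun j => !(PySem.List.pyGetD n_str.toList j ' ' == '0'))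
    let ans := (PySem.List.pyRange 0 (PySem.List.len ones) 1).foldl
      (fun ans o =>
        let j := PySem.List.pyGetD ones o 0
        valid.foldl
          (fun ans i =>
            if i < o then ans
            else
              let add0 := PySem.Int.mod (comb (x - 1 - j) (i - o)) 1000000007
              let add_val := if i - o = 1 ∧ k = 1 then add0 - 1 else add0
              PySem.Int.mod (ans + add_val) 1000000007) ans) 0
    let cou : Int := ((PySem.Str.count n_str "1" : Nat) : Int)
    valid.foldl (fun ans i => if cou = i then PySem.Int.mod (ans + 1) 1000000007 else ans) ans

-- ===== PRECONDITION & SPEC =====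
-- On n_str = "" with k ≠ 0 Python's A raises IndexError at dp[1] = 1; those inputs are excluded.
def Pre_solve (n_str : String) (k : Int) : Prop := n_str ≠ "" ∨ k = 0
instance (n_str : String) (k : Int) : Decidable (Pre_solve n_str k) := by
  unfold Pre_solve; infer_instance

def pvWitness_solve : String × Int := ("110", 2)

def Spec_solve (n_str : String) (k : Int) (out : Int) : Prop := out = solve_alt n_str k
instance (n_str : String) (k : Int) (out : Int) : Decidable (Spec_solve n_str k out) := by
  unfold Spec_solve; infer_instance

-- ===== CLAIM (what is proved, stated in full; the proofs are below) =====
def Claim_equal_solve : Prop := ∀ (n_str : String) (k : Int),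
  Dom_solve n_str k → Pre_solve n_str k → Spec_solve n_str k (solve n_str k)

-- ===== LEMMAS AND PROOFS =====

-- % is Int.emod here because the modulus 1000000007 is positive
theorem pv_mod_emod (a : Int) : PySem.Int.mod a 1000000007 = a % 1000000007 :=
  PySem.Int.mod_eq_emod_of_pos (by norm_num)

def chooseM (a b : Nat) : Int := ((a.choose b : Nat) : Int) % 1000000007

theorem chooseM_zero (b : Nat) : chooseM 0 b = if b = 0 then 1 else 0 := by
  cases b with
  | zero => simp [chooseM]
  | succ b => simp [chooseM, Nat.choose]

theorem chooseM_pascal (a b : Nat) (hb : 1 ≤ b) :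
    (chooseM a (b - 1) + chooseM a b) % 1000000007 = chooseM (a + 1) b := by
  unfold chooseM
  rw [Int.emod_add_emod, Int.add_comm, Int.emod_add_emod, Int.add_comm]
  have h2 : a.choose (b - 1) + a.choose b = (a + 1).choose b := by
    have h := Nat.choose_succ_succ a (b - 1)
    simp only [Nat.succ_eq_add_one] at h
    rw [show b - 1 + 1 = b from by omega] at h
    omega
  rw [← Nat.cast_add, h2]

-- the A-side summand: dp1 entry with the (se == 1 and k == 1) correction
def aTermD (x k : Int) (dp1 : List (List Int)) (se j : Int) : Int :=
  let add0 := PySem.List.pyGetD (PySem.List.pyGetD dp1 (x - 1 - j) []) se 0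
  if se = 1 ∧ k = 1 then add0 - 1 else add0

-- a fold each of whose steps sends (s % mod) to ((s + G y) % mod)
theorem foldl_mod_gen {α : Type} (l : List α) (f : Int → α → Int) (G : α → Int) :
    ∀ s init : Int,
      (∀ y ∈ l, ∀ t : Int, f (t % 1000000007) y = (t + G y) % 1000000007) →
      init = s % 1000000007 →
      l.foldl f init = (s + (l.map G).sum) % 1000000007 := by
  induction l with
  | nil => intro s init _ hinit; simpa using hinit
  | cons y l ih =>
    intro s init h hinit
    have h1 : f init y = (s + G y) % 1000000007 := by
      rw [hinit]; exact h y List.mem_cons_self s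
    simp only [List.foldl_cons, List.map_cons, List.sum_cons]
    rw [ih (s + G y) (f init y) (fun z hz t => h z (List.mem_cons_of_mem _ hz) t) h1]
    congr 1; ring

theorem sum_map_comm {α β : Type} (l1 : List α) (l2 : List β) (f : α → β → Int) :
    (l1.map (fun a => (l2.map (fun b => f a b)).sum)).sum
      = (l2.map (fun b => (l1.map (fun a => f a b)).sum)).sum := by
  induction l1 with
  | nil => simp
  | cons a l ih =>
    simp only [List.map_cons, List.sum_cons, ih]
    rw [← PySem.List.sum_map_add_int]

theorem sum_map_ite_filter {α : Type} (l : List α) (p : α → Bool) (g : α → Int) :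
    (l.map (fun y => if p y then g y else 0)).sum = ((l.filter p).map g).sum := by
  induction l with
  | nil => simp
  | cons y l ih => by_cases hp : p y <;> simp [List.filter_cons, hp, ih]

theorem enumerate_shift {α : Type} (xs : List α) :
    ∀ s : Int, PySem.List.enumerate xs (s + 1)
      = (PySem.List.enumerate xs s).map (fun p => (p.1 + 1, p.2)) := by
  induction xs with
  | nil => intro s; simp [PySem.List.enumerate_nil]
  | cons x xs ih =>
    intro s
    rw [PySem.List.enumerate_cons, PySem.List.enumerate_cons, List.map_cons, ← ih (s + 1)]

theorem innerA_spec (cs : List Char) (x k : Int) (dp1 : List (List Int)) :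
    ∀ (js : List Int) (s se : Int), 0 ≤ se →
      innerA cs x k dp1 js (s % 1000000007) se
        = (s + ((PySem.List.enumerate
              (js.filter (fun j => !(PySem.List.pyGetD cs j ' ' == '0')))).map
                (fun p => if p.1 ≤ se then aTermD x k dp1 (se - p.1) p.2 else 0)).sum)
            % 1000000007 := by
  intro js
  induction js with
  | nil => intro s se _; simp [innerA, PySem.List.enumerate_nil]
  | cons j js ih =>
    intro s se hse
    by_cases hc : PySem.List.pyGetD cs j ' ' = '0'
    · rw [show innerA cs x k dp1 (j :: js) (s % 1000000007) se
            = innerA cs x k dp1 js (s % 1000000007) se from by simp [innerA, hc]]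
      rw [ih s se hse]
      simp [List.filter_cons, hc]
    · have hfil : (j :: js).filter (fun j => !(PySem.List.pyGetD cs j ' ' == '0'))
          = j :: js.filter (fun j => !(PySem.List.pyGetD cs j ' ' == '0')) := by
        simp [List.filter_cons, hc]
      have hstep : innerA cs x k dp1 (j :: js) (s % 1000000007) se
          = (if se - 1 < 0 then (s % 1000000007 + aTermD x k dp1 se j) % 1000000007
             else innerA cs x k dp1 js
               ((s % 1000000007 + aTermD x k dp1 se j) % 1000000007) (se - 1)) := by
        simp only [innerA, if_neg hc, aTermD, pv_mod_emod]
      rw [hstep, hfil, Int.emod_add_emod, PySem.List.enumerate_cons, enumerate_shift _ 0]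
      by_cases hz : se - 1 < 0
      · have hse0 : se = 0 := by omega
        subst hse0
        rw [if_pos hz]
        simp only [List.map_cons, List.sum_cons, List.map_map]
        have hzero : ((PySem.List.enumerate
            (js.filter (fun j => !(PySem.List.pyGetD cs j ' ' == '0'))) 0).map
              ((fun p : Int × Int => if p.1 ≤ (0:Int) then aTermD x k dp1 (0 - p.1) p.2 else 0) ∘
                (fun p : Int × Int => (p.1 + 1, p.2)))).sum = 0 := by
          apply List.sum_eq_zero
          intro z hz'
          rcases List.mem_map.mp hz' with ⟨p, hp, rfl⟩
          rcases (PySem.List.mem_enumerate_iff _ _ _).mp hp with ⟨m, hm, rfl⟩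
          simp only [Function.comp]
          rw [if_neg (by push_cast; omega)]
        rw [hzero]
        norm_num
      · rw [if_neg hz, ih (s + aTermD x k dp1 se j) (se - 1) (by omega)]
        simp only [List.map_cons, List.sum_cons, List.map_map]
        have hmapeq : ((PySem.List.enumerate
            (js.filter (fun j => !(PySem.List.pyGetD cs j ' ' == '0'))) 0).map
              ((fun p : Int × Int => if p.1 ≤ se then aTermD x k dp1 (se - p.1) p.2 else 0) ∘
                (fun p : Int × Int => (p.1 + 1, p.2)))).sum
            = ((PySem.List.enumerate
            (js.filter (fun j => !(PySem.List.pyGetD cs j ' ' == '0'))) 0).map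
              (fun p : Int × Int => if p.1 ≤ se - 1 then aTermD x k dp1 (se - 1 - p.1) p.2 else 0)).sum := by
          congr 1
          apply List.map_congr_left
          intro p _
          simp only [Function.comp]
          by_cases hle : p.1 ≤ se - 1
          · rw [if_pos (by omega : p.1 + 1 ≤ se), if_pos hle,
              show se - (p.1 + 1) = se - 1 - p.1 from by ring]
          · rw [if_neg (by omega : ¬ p.1 + 1 ≤ se), if_neg hle]
        rw [hmapeq, if_pos hse]
        congr 1; ring

-- ---- B's comb computes the binomial coefficient ----

theorem comb_upto (n r : Int) (h1 : r ≤ n) :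
    ∀ m : Nat, (m : Int) ≤ r →
      (PySem.List.pyRange 1 ((m : Int) + 1)).foldl
          (fun c t => PySem.Int.floordiv (c * (n - r + t)) t) 1
        = (((n - r).toNat + m).choose m : Int) := by
  intro m
  induction m with
  | zero => intro _; rw [show ((0:Nat):Int) + 1 = 1 from by norm_num,
      PySem.List.pyRange_one_eq_nil le_rfl]; simp
  | succ m ih =>
    intro hm
    have hm' : (m : Int) ≤ r := by push_cast at hm; omega
    have hr0 : 0 ≤ r := le_trans (by positivity) hm
    have hN : ((n - r).toNat : Int) = n - r := Int.toNat_of_nonneg (by omega)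
    rw [show (((m+1:Nat)):Int) + 1 = ((m:Int) + 1) + 1 from by push_cast; ring,
      PySem.List.pyRange_one_succ_right (by omega : (1:Int) ≤ (m:Int) + 1),
      List.foldl_append, ih hm']
    simp only [List.foldl_cons, List.foldl_nil]
    rw [show n - r + ((m:Int) + 1) = (((n - r).toNat + m + 1 : Nat) : Int) from by
      push_cast; omega]
    rw [show ((m:Int) + 1) = (((m + 1 : Nat)) : Int) from by push_cast; ring]
    rw [show ((((n - r).toNat + m).choose m : Nat) : Int) * (((n - r).toNat + m + 1 : Nat) : Int)
        = ((((n - r).toNat + m).choose m * ((n - r).toNat + m + 1) : Nat) : Int) from by push_cast; ring]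
    rw [PySem.Int.floordiv_natCast]
    have hc : ((n - r).toNat + m).choose m * ((n - r).toNat + m + 1)
        = ((n - r).toNat + (m + 1)).choose (m + 1) * (m + 1) := by
      have h := Nat.add_one_mul_choose_eq ((n - r).toNat + m) m
      calc ((n - r).toNat + m).choose m * ((n - r).toNat + m + 1)
          = ((n - r).toNat + m + 1) * ((n - r).toNat + m).choose m := by ring
        _ = ((n - r).toNat + m + 1).choose (m + 1) * (m + 1) := h
        _ = ((n - r).toNat + (m + 1)).choose (m + 1) * (m + 1) := by ring_nf
    rw [hc, Nat.mul_div_cancel _ (by omega : 0 < m + 1)]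

theorem comb_eq_choose (n r : Int) (hn : 0 ≤ n) (hr : 0 ≤ r) :
    comb n r = (n.toNat.choose r.toNat : Int) := by
  by_cases hlt : n < r
  · rw [comb, if_pos (Or.inr hlt)]
    rw [Nat.choose_eq_zero_of_lt ((Int.toNat_lt_toNat (by omega)).mpr hlt)]
    norm_num
  · push_neg at hlt
    obtain ⟨rN, rfl⟩ : ∃ rN : Nat, r = (rN : Int) := ⟨r.toNat, (Int.toNat_of_nonneg hr).symm⟩
    rw [comb, if_neg (by push_neg; exact ⟨by positivity, hlt⟩)]
    rw [comb_upto n (rN : Int) hlt rN le_rfl,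
      show ((rN : Int)).toNat = rN from by omega,
      show (n - (rN : Int)).toNat + rN = n.toNat from by omega]

-- ---- characterizing A's Pascal-triangle table ----

theorem pyGetD_pySetD_self {α : Type} (t : List α) (i : Int) (v d : α)
    (h0 : 0 ≤ i) (hl : i < (t.length : Int)) :
    PySem.List.pyGetD (PySem.List.pySetD t i v) i d = v := by
  have h1 : i = ((i.toNat : Nat) : Int) := (Int.toNat_of_nonneg h0).symm
  rw [h1, PySem.List.pyGetD_pySetD_natCast t i.toNat i.toNat v d (by omega), if_pos rfl]

theorem pyGetD_pySetD_ne {α : Type} (t : List α) (i m : Int) (v d : α)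
    (h0 : 0 ≤ i) (hl : i < (t.length : Int)) (h0m : 0 ≤ m) (hne : m ≠ i) :
    PySem.List.pyGetD (PySem.List.pySetD t i v) m d = PySem.List.pyGetD t m d := by
  have h1 : i = ((i.toNat : Nat) : Int) := (Int.toNat_of_nonneg h0).symm
  have h2 : m = ((m.toNat : Nat) : Int) := (Int.toNat_of_nonneg h0m).symm
  rw [h1, h2, PySem.List.pyGetD_pySetD_natCast t i.toNat m.toNat v d (by omega),
    if_neg (by omega)]

theorem pySetD_pySetD {α : Type} (t : List α) (i : Int) (v w : α) (h0 : 0 ≤ i) :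
    PySem.List.pySetD (PySem.List.pySetD t i v) i w = PySem.List.pySetD t i w := by
  rw [PySem.List.pySetD_of_nonneg t v h0, PySem.List.pySetD_of_nonneg _ w h0,
    PySem.List.pySetD_of_nonneg t w h0, List.set_set]

theorem pySetD_getD_self {α : Type} (t : List α) (d : α) (i : Int)
    (h0 : 0 ≤ i) (h1 : i < (t.length : Int)) :
    PySem.List.pySetD t i (PySem.List.pyGetD t i d) = t := by
  rw [PySem.List.pySetD_of_nonneg _ _ h0, PySem.List.pyGetD_eq_getElem t d h0 h1]
  exact List.set_getElem_self (by omega)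

theorem foldl_length_inv {α β : Type} (l : List β) (f : List α → β → List α)
    (h : ∀ t y, (f t y).length = t.length) : ∀ t, (l.foldl f t).length = t.length := by
  induction l with
  | nil => intro t; rfl
  | cons y l ih => intro t; rw [List.foldl_cons, ih (f t y), h t y]

theorem getD_foldl_rowmod {α : Type} (g : α → α) (d : α) :
    ∀ (js : List Int) (t : List α), js.Nodup →
      (∀ j ∈ js, 0 ≤ j ∧ j < (t.length : Int)) →
      ∀ a : Nat, a < t.length →
        PySem.List.pyGetD
            (js.foldl (fun t i => PySem.List.pySetD t i (g (PySem.List.pyGetD t i d))) t)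
            (a : Int) d
          = if (a : Int) ∈ js then g (PySem.List.pyGetD t (a : Int) d)
            else PySem.List.pyGetD t (a : Int) d := by
  intro js
  induction js with
  | nil => intro t _ _ a ha; simp
  | cons j js ih =>
    intro t hnd hb a ha
    obtain ⟨hj0, hjlen⟩ := hb j List.mem_cons_self
    have hlen' : (PySem.List.pySetD t j (g (PySem.List.pyGetD t j d))).length = t.length :=
      PySem.List.length_pySetD t j _
    have hih := ih (PySem.List.pySetD t j (g (PySem.List.pyGetD t j d))) hnd.of_cons
      (by intro z hz; rw [hlen']; exact hb z (List.mem_cons_of_mem _ hz)) a (by omega)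
    rw [List.foldl_cons, hih]
    have hga : PySem.List.pyGetD (PySem.List.pySetD t j (g (PySem.List.pyGetD t j d))) (a:Int) d
        = if (a:Int) = j then g (PySem.List.pyGetD t (a:Int) d)
          else PySem.List.pyGetD t (a:Int) d := by
      by_cases haj : (a:Int) = j
      · rw [if_pos haj, ← haj, pyGetD_pySetD_self t (a:Int) _ d (by positivity) (by omega)]
      · rw [if_neg haj, pyGetD_pySetD_ne t j (a:Int) _ d hj0 hjlen (by positivity) haj]
    by_cases hmem : (a:Int) ∈ js
    · rw [if_pos hmem, if_pos (List.mem_cons_of_mem _ hmem), hga,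
        if_neg (by intro h; exact (List.nodup_cons.mp hnd).1 (h ▸ hmem))]
    · rw [if_neg hmem, hga]
      by_cases haj : (a:Int) = j
      · rw [if_pos haj, if_pos (by rw [haj]; exact List.mem_cons_self)]
      · rw [if_neg haj, if_neg (by simp [List.mem_cons, haj, hmem])]

theorem getD_foldl_setD (v : Int → Int) :
    ∀ (js : List Int) (r : List Int),
      (∀ j ∈ js, 0 ≤ j ∧ j < (r.length : Int)) →
      ∀ b : Nat, b < r.length →
        PySem.List.pyGetD (js.foldl (fun r j => PySem.List.pySetD r j (v j)) r) (b : Int) 0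
          = if (b : Int) ∈ js then v (b : Int) else PySem.List.pyGetD r (b : Int) 0 := by
  intro js
  induction js with
  | nil => intro r _ b hb; simp
  | cons j js ih =>
    intro r hb b hblen
    obtain ⟨hj0, hjl⟩ := hb j List.mem_cons_self
    have hlen : (PySem.List.pySetD r j (v j)).length = r.length := PySem.List.length_pySetD ..
    rw [List.foldl_cons, ih (PySem.List.pySetD r j (v j))
      (by intro z hz; rw [hlen]; exact hb z (List.mem_cons_of_mem _ hz)) b (by omega)]
    by_cases hmem : (b:Int) ∈ js
    · rw [if_pos hmem, if_pos (List.mem_cons_of_mem _ hmem)]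
    · rw [if_neg hmem]
      by_cases hbj : (b : Int) = j
      · rw [if_pos (by rw [hbj]; exact List.mem_cons_self), ← hbj,
          pyGetD_pySetD_self r (b:Int) _ 0 (by positivity) (by omega)]
      · rw [if_neg (by simp [List.mem_cons, hbj, hmem]),
          pyGetD_pySetD_ne r j (b:Int) (v j) 0 hj0 hjl (by positivity) hbj]

theorem foldl_set_row (F : List Int → Int → Int) (i : Int) (hi : 1 ≤ i) :
    ∀ (js : List Int) (t : List (List Int)), i < (t.length : Int) →
      js.foldl (fun t j => PySem.List.pySetD t i
          (PySem.List.pySetD (PySem.List.pyGetD t i []) j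
            (F (PySem.List.pyGetD t (i - 1) []) j))) t
        = PySem.List.pySetD t i
            (js.foldl (fun r j => PySem.List.pySetD r j
                (F (PySem.List.pyGetD t (i - 1) []) j))
              (PySem.List.pyGetD t i [])) := by
  intro js
  induction js with
  | nil => intro t ht; exact (pySetD_getD_self t [] i (by omega) ht).symm
  | cons j js ih =>
    intro t ht
    simp only [List.foldl_cons]
    have hlen : (PySem.List.pySetD t i
        (PySem.List.pySetD (PySem.List.pyGetD t i []) j
          (F (PySem.List.pyGetD t (i - 1) []) j))).length = t.length :=
      PySem.List.length_pySetD ..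
    rw [ih _ (by rw [hlen]; exact ht)]
    rw [pyGetD_pySetD_ne t i (i-1) _ [] (by omega) ht (by omega) (by omega)]
    rw [pyGetD_pySetD_self t i _ [] (by omega) ht]
    rw [pySetD_pySetD t i _ _ (by omega)]

-- the two initialization loops produce the row [1, 0, ..., 0] everywhere
theorem initTbl_len (x : Nat) : (initTbl (x:Int)).length = x + 1 := by
  unfold initTbl
  rw [foldl_length_inv _ _ (fun t y => PySem.List.length_pySetD ..)]
  rw [List.length_map, PySem.List.length_pyRange_one]
  omega

theorem initTbl_row (x : Nat) (a : Nat) (ha : a < x + 1) :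
    PySem.List.pyGetD (initTbl (x:Int)) (a:Int) []
      = PySem.List.pySetD (List.replicate (x+1) (0:Int)) 0 1 := by
  unfold initTbl
  have ht0 : ((PySem.List.pyRange 0 ((x:Int)+1)).map
        (fun _ => PySem.List.pyRepeat [(0:Int)] ((x:Int)+1)))
      = List.replicate (x+1) (List.replicate (x+1) (0:Int)) := by
    rw [List.map_const', PySem.List.length_pyRange_one, PySem.List.pyRepeat_singleton]
    congr 1 <;> omega
  rw [ht0]
  rw [getD_foldl_rowmod (fun row => PySem.List.pySetD row 0 1) []
    (PySem.List.pyRange 0 ((x:Int)+1)) _ (PySem.List.nodup_pyRange_one 0 _)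
    (by intro j hj
        have := PySem.List.mem_pyRange_one.mp hj
        simp only [List.length_replicate]
        constructor
        · omega
        · push_cast; omega)
    a (by simp only [List.length_replicate]; omega)]
  rw [if_pos (PySem.List.mem_pyRange_one.mpr ⟨by positivity, by push_cast; omega⟩)]
  rw [PySem.List.pyGetD_natCast, List.getD_replicate _ (by omega)]

theorem initTbl_entry (x a b : Nat) (ha : a ≤ x) (hb : b ≤ x) :
    PySem.List.pyGetD (PySem.List.pyGetD (initTbl (x:Int)) (a:Int) []) (b:Int) 0
      = if b = 0 then 1 else 0 := by
  rw [initTbl_row x a (by omega)]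
  have h := PySem.List.pyGetD_pySetD_natCast (List.replicate (x+1) (0:Int)) 0 b 1 0
    (by simp only [List.length_replicate]; omega)
  push_cast at h
  rw [h]
  by_cases hb0 : b = 0
  · rw [if_pos hb0, if_pos hb0]
  · rw [if_neg hb0, if_neg hb0, PySem.List.pyGetD_natCast,
      List.getD_replicate _ (by omega)]

def dp1Upto (x m : Nat) : List (List Int) :=
  (PySem.List.pyRange 1 ((m:Int) + 1)).foldl dp1Inner (initTbl (x:Int))

theorem buildDp1_eq (x : Nat) : buildDp1 (x:Int) = dp1Upto x x := rfl

theorem dp1Upto_inv (x : Nat) : ∀ m : Nat, m ≤ x →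
    (dp1Upto x m).length = x + 1 ∧
    (∀ a : Nat, a ≤ x → (PySem.List.pyGetD (dp1Upto x m) (a:Int) []).length = x + 1) ∧
    (∀ a b : Nat, a ≤ x → b ≤ x →
      PySem.List.pyGetD (PySem.List.pyGetD (dp1Upto x m) (a:Int) []) (b:Int) 0
        = if a ≤ m then chooseM a b else (if b = 0 then 1 else 0)) := by
  intro m
  induction m with
  | zero =>
    intro _
    have hnil : dp1Upto x 0 = initTbl (x:Int) := by
      unfold dp1Upto
      rw [show ((0:Nat):Int) + 1 = 1 from by norm_num, PySem.List.pyRange_one_eq_nil le_rfl]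
      rfl
    rw [hnil]
    refine ⟨initTbl_len x, ?_, ?_⟩
    · intro a ha
      rw [initTbl_row x a (by omega), PySem.List.length_pySetD, List.length_replicate]
    · intro a b ha hb
      rw [initTbl_entry x a b ha hb]
      by_cases ha0 : a ≤ 0
      · rw [if_pos ha0, show a = 0 from by omega, chooseM_zero]
      · rw [if_neg ha0]
  | succ m ih =>
    intro hm1
    obtain ⟨hL, hRL, hE⟩ := ih (by omega)
    have hstep : dp1Upto x (m+1) = dp1Inner (dp1Upto x m) ((m:Int)+1) := by
      unfold dp1Upto
      rw [show (((m+1:Nat)):Int) + 1 = ((m:Int) + 1) + 1 from by push_cast; ring,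
        PySem.List.pyRange_one_succ_right (by omega : (1:Int) ≤ (m:Int) + 1),
        List.foldl_append]
      rfl
    have hiT : ((m:Int)+1) < ((dp1Upto x m).length : Int) := by rw [hL]; push_cast; omega
    have hcollapse : dp1Inner (dp1Upto x m) ((m:Int)+1)
        = PySem.List.pySetD (dp1Upto x m) ((m:Int)+1)
            ((PySem.List.pyRange 1 (((m:Int)+1)+1)).foldl
              (fun r j => PySem.List.pySetD r j
                (PySem.Int.mod
                  (PySem.List.pyGetD (PySem.List.pyGetD (dp1Upto x m) (((m:Int)+1)-1) []) (j-1) 0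
                    + PySem.List.pyGetD (PySem.List.pyGetD (dp1Upto x m) (((m:Int)+1)-1) []) j 0)
                  1000000007))
              (PySem.List.pyGetD (dp1Upto x m) ((m:Int)+1) [])) := by
      unfold dp1Inner
      exact foldl_set_row
        (fun prev j => PySem.Int.mod
          (PySem.List.pyGetD prev (j-1) 0 + PySem.List.pyGetD prev j 0) 1000000007)
        ((m:Int)+1) (by omega) _ (dp1Upto x m) hiT
    have hprevrow : ∀ b : Nat, b ≤ x →
        PySem.List.pyGetD (PySem.List.pyGetD (dp1Upto x m) (((m:Int)+1)-1) []) (b:Int) 0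
          = chooseM m b := by
      intro b hb
      rw [show ((m:Int)+1)-1 = ((m:Nat):Int) from by push_cast; ring,
        hE m b (by omega) hb, if_pos le_rfl]
    have hr0row : ∀ b : Nat, b ≤ x →
        PySem.List.pyGetD (PySem.List.pyGetD (dp1Upto x m) ((m:Int)+1) []) (b:Int) 0
          = if b = 0 then 1 else 0 := by
      intro b hb
      rw [show ((m:Int)+1) = (((m+1:Nat)):Int) from by push_cast; ring,
        hE (m+1) b (by omega) hb, if_neg (by omega)]
    have hr0len : (PySem.List.pyGetD (dp1Upto x m) ((m:Int)+1) []).length = x + 1 := by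
      rw [show ((m:Int)+1) = (((m+1:Nat)):Int) from by push_cast; ring]
      exact hRL (m+1) (by omega)
    have hnewlen : ((PySem.List.pyRange 1 (((m:Int)+1)+1)).foldl
        (fun r j => PySem.List.pySetD r j
          (PySem.Int.mod
            (PySem.List.pyGetD (PySem.List.pyGetD (dp1Upto x m) (((m:Int)+1)-1) []) (j-1) 0
              + PySem.List.pyGetD (PySem.List.pyGetD (dp1Upto x m) (((m:Int)+1)-1) []) j 0)
            1000000007))
        (PySem.List.pyGetD (dp1Upto x m) ((m:Int)+1) [])).length = x + 1 := by
      rw [foldl_length_inv _ _ (fun t y => PySem.List.length_pySetD ..)]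
      exact hr0len
    have hnewentry : ∀ b : Nat, b ≤ x →
        PySem.List.pyGetD ((PySem.List.pyRange 1 (((m:Int)+1)+1)).foldl
          (fun r j => PySem.List.pySetD r j
            (PySem.Int.mod
              (PySem.List.pyGetD (PySem.List.pyGetD (dp1Upto x m) (((m:Int)+1)-1) []) (j-1) 0
                + PySem.List.pyGetD (PySem.List.pyGetD (dp1Upto x m) (((m:Int)+1)-1) []) j 0)
              1000000007))
          (PySem.List.pyGetD (dp1Upto x m) ((m:Int)+1) [])) (b:Int) 0
          = chooseM (m+1) b := by
      intro b hb
      rw [getD_foldl_setD _ (PySem.List.pyRange 1 (((m:Int)+1)+1))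
        (PySem.List.pyGetD (dp1Upto x m) ((m:Int)+1) [])
        (by intro j hj
            have := PySem.List.mem_pyRange_one.mp hj
            rw [hr0len]
            constructor
            · omega
            · push_cast; omega)
        b (by rw [hr0len]; omega)]
      by_cases hmem : (b:Int) ∈ PySem.List.pyRange 1 (((m:Int)+1)+1)
      · have hbr := PySem.List.mem_pyRange_one.mp hmem
        have hb1 : 1 ≤ b := by exact_mod_cast hbr.1
        rw [if_pos hmem]
        rw [show ((b:Int) - 1) = (((b-1:Nat)):Int) from by push_cast [hb1]; omega]
        rw [hprevrow (b-1) (by omega), hprevrow b hb, pv_mod_emod]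
        exact chooseM_pascal m b hb1
      · rw [if_neg hmem, hr0row b hb]
        by_cases hb0 : b = 0
        · rw [if_pos hb0, hb0]
          unfold chooseM
          norm_num
        · rw [if_neg hb0]
          have hbgt : m + 1 < b := by
            by_contra hle
            push_neg at hle
            exact hmem (PySem.List.mem_pyRange_one.mpr
              ⟨by exact_mod_cast Nat.one_le_iff_ne_zero.mpr hb0, by push_cast; omega⟩)
          unfold chooseM
          rw [Nat.choose_eq_zero_of_lt hbgt]
          norm_num
    rw [hstep, hcollapse]
    refine ⟨by rw [PySem.List.length_pySetD]; exact hL, ?_, ?_⟩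
    · intro a ha
      by_cases hai : (a:Int) = (m:Int)+1
      · rw [hai, pyGetD_pySetD_self _ _ _ [] (by omega) hiT]
        exact hnewlen
      · rw [pyGetD_pySetD_ne _ _ _ _ [] (by omega) hiT (by positivity) hai]
        exact hRL a ha
    · intro a b ha hb
      by_cases hai : (a:Int) = (m:Int)+1
      · have ham : a = m + 1 := by omega
        rw [hai, pyGetD_pySetD_self _ _ _ [] (by omega) hiT, hnewentry b hb, ham,
          if_pos le_rfl]
      · have ham : ¬ a = m + 1 := by omega
        rw [pyGetD_pySetD_ne _ _ _ _ [] (by omega) hiT (by positivity) hai, hE a b ha hb]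
        by_cases h2 : a ≤ m
        · rw [if_pos h2, if_pos (show a ≤ m + 1 from by omega)]
        · rw [if_neg h2, if_neg (show ¬ a ≤ m + 1 from by omega)]

theorem dp1_entry (x a b : Nat) (ha : a ≤ x) (hb : b ≤ x) :
    PySem.List.pyGetD (PySem.List.pyGetD (buildDp1 (x:Int)) (a:Int) []) (b:Int) 0
      = chooseM a b := by
  rw [buildDp1_eq, (dp1Upto_inv x x le_rfl).2.2 a b ha hb, if_pos ha]

-- the B-side summand, in the shape produced by B's two nested passes
def pvTB (x k : Int) (ones : List Int) (i o : Int) : Int :=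
  if i < o then 0
  else
    if i - o = 1 ∧ k = 1 then
      comb (x - 1 - PySem.List.pyGetD ones o 0) (i - o) % 1000000007 - 1
    else comb (x - 1 - PySem.List.pyGetD ones o 0) (i - o) % 1000000007

-- the A-side per-depth contribution (inner scan total plus the cou == i bonus)
def pvGA (x k : Int) (dp : List Int) (dp1 : List (List Int)) (ones : List Int) (cou i : Int) : Int :=
  if PySem.List.pyGetD dp i 0 == k then
    ((PySem.List.enumerate ones).map
      (fun p => if p.1 ≤ i then aTermD x k dp1 (i - p.1) p.2 else 0)).sum
    + (if cou = i then 1 else 0)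
  else 0

-- ===== VERDICT (by name: the statement is the Claim_ definition above) =====
set_option maxHeartbeats 1600000 in
theorem solve_spec : Claim_equal_solve := by
  unfold Claim_equal_solve
  intro n_str k _hdom hpre
  unfold Spec_solve
  by_cases h1 : n_str = "1"
  · simp only [solve, solve_alt, if_pos h1]
  by_cases hk : k = 0
  · simp only [solve, solve_alt, if_neg h1, if_pos hk]
  simp only [solve, solve_alt, if_neg h1, if_neg hk, PySem.Str.len_eq, pv_mod_emod]
  set cs := n_str.toList with hcs
  set xN := cs.length with hxN
  set dp := buildDp ((xN : Nat) : Int) with hdp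
  set dp1 := buildDp1 ((xN : Nat) : Int) with hdp1
  set cou := ((PySem.Str.count n_str "1" : Nat) : Int) with hcou
  set ones := (PySem.List.pyRange 0 ((xN : Nat) : Int)).filter
      (fun j => !(PySem.List.pyGetD cs j ' ' == '0')) with hones
  set valid := (PySem.List.pyRange 1 (((xN : Nat) : Int) + 1)).filter
      (fun i => PySem.List.pyGetD dp i 0 == k) with hvalid
  -- pointwise equality of the two summands
  have hterm : ∀ i ∈ valid, ∀ o ∈ PySem.List.pyRange 0 (PySem.List.len ones),
      (if o ≤ i then aTermD ((xN : Nat) : Int) k dp1 (i - o) (PySem.List.pyGetD ones o 0) else 0)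
        = pvTB ((xN : Nat) : Int) k ones i o := by
    intro i hi o ho
    have hi2 := hi
    rw [hvalid] at hi2
    have hiR := PySem.List.mem_pyRange_one.mp (List.mem_filter.mp hi2).1
    have hoR : 0 ≤ o ∧ o < (ones.length : Int) := by
      have h := PySem.List.mem_pyRange_one.mp ho
      rwa [PySem.List.len_eq] at h
    have hjmem : PySem.List.pyGetD ones o 0 ∈ ones := by
      apply PySem.List.pyGetD_mem
      simp only [PySem.Raise.InRange]
      omega
    have hjr : 0 ≤ PySem.List.pyGetD ones o 0 ∧ PySem.List.pyGetD ones o 0 < ((xN : Nat) : Int) := by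
      rw [hones] at hjmem
      exact PySem.List.mem_pyRange_one.mp (List.mem_filter.mp hjmem).1
    by_cases hoi : o ≤ i
    · rw [if_pos hoi]
      simp only [pvTB, if_neg (show ¬ i < o from by omega)]
      have hdpentry : PySem.List.pyGetD
          (PySem.List.pyGetD dp1 (((xN : Nat) : Int) - 1 - PySem.List.pyGetD ones o 0) [])
          (i - o) 0
          = chooseM (((xN : Nat) : Int) - 1 - PySem.List.pyGetD ones o 0).toNat (i - o).toNat := by
        have h := dp1_entry xN (((xN : Nat) : Int) - 1 - PySem.List.pyGetD ones o 0).toNat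
          (i - o).toNat (by omega) (by omega)
        rw [Int.toNat_of_nonneg (by omega : (0:Int) ≤ ((xN : Nat) : Int) - 1 - PySem.List.pyGetD ones o 0),
          Int.toNat_of_nonneg (by omega : (0:Int) ≤ i - o)] at h
        rw [hdp1]
        exact h
      have hcomb : comb (((xN : Nat) : Int) - 1 - PySem.List.pyGetD ones o 0) (i - o) % 1000000007
          = chooseM (((xN : Nat) : Int) - 1 - PySem.List.pyGetD ones o 0).toNat (i - o).toNat := by
        rw [comb_eq_choose _ _ (by omega) (by omega)]
        rfl
      simp only [aTermD]
      rw [hdpentry, hcomb]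
    · rw [if_neg hoi]
      simp only [pvTB, if_pos (show i < o from by omega)]
  have hSigA : ∀ i ∈ valid,
      ((PySem.List.enumerate ones).map
        (fun p => if p.1 ≤ i then aTermD ((xN : Nat) : Int) k dp1 (i - p.1) p.2 else 0)).sum
        = ((PySem.List.pyRange 0 (PySem.List.len ones)).map
            (fun o => pvTB ((xN : Nat) : Int) k ones i o)).sum := by
    intro i hi
    rw [PySem.List.enumerate_eq_map_pyRange ones 0, List.map_map]
    exact congrArg List.sum (List.map_congr_left (fun o ho => by
      simp only [Function.comp]
      exact hterm i hi o ho))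
  have hsum : ((PySem.List.pyRange 1 (((xN : Nat) : Int) + 1)).map
        (fun i => pvGA ((xN : Nat) : Int) k dp dp1 ones cou i)).sum
      = ((PySem.List.pyRange 0 (PySem.List.len ones)).map
          (fun o => (valid.map (fun i => pvTB ((xN : Nat) : Int) k ones i o)).sum)).sum
        + (valid.map (fun i => if cou = i then (1:Int) else 0)).sum := by
    have h1 : ((PySem.List.pyRange 1 (((xN : Nat) : Int) + 1)).map
          (fun i => pvGA ((xN : Nat) : Int) k dp dp1 ones cou i)).sum
        = (valid.map (fun i =>
            ((PySem.List.enumerate ones).map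
              (fun p => if p.1 ≤ i then aTermD ((xN : Nat) : Int) k dp1 (i - p.1) p.2 else 0)).sum
            + (if cou = i then (1:Int) else 0))).sum := by
      simp only [pvGA]
      rw [hvalid]
      exact sum_map_ite_filter _ (fun i => PySem.List.pyGetD dp i 0 == k) _
    rw [h1, PySem.List.sum_map_add_int, List.map_congr_left hSigA,
      sum_map_comm valid (PySem.List.pyRange 0 (PySem.List.len ones))
        (fun i o => pvTB ((xN : Nat) : Int) k ones i o)]
  rw [foldl_mod_gen _ _ (fun i => pvGA ((xN : Nat) : Int) k dp dp1 ones cou i) 0 0 ?hGA (by norm_num)]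
  case hGA =>
    intro i hi t
    have hi' := PySem.List.mem_pyRange_one.mp hi
    by_cases hd : PySem.List.pyGetD dp i 0 = k
    · rw [if_neg (not_not_intro hd)]
      rw [innerA_spec cs ((xN : Nat) : Int) k dp1 (PySem.List.pyRange 0 ((xN : Nat) : Int)) t i (by omega)]
      rw [← hones]
      simp only [pvGA, hd, beq_self_eq_true, if_true]
      by_cases hcou : cou = i
      · rw [if_pos hcou, if_pos hcou, Int.emod_add_emod]
        congr 1; ring
      · rw [if_neg hcou, if_neg hcou]
        congr 1; ring
    · rw [if_pos hd]
      simp only [pvGA, if_neg (show ¬ (PySem.List.pyGetD dp i 0 == k) = true from by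
        simp [hd])]
      simp
  rw [foldl_mod_gen _ _ (fun o => (valid.map
        (fun i => pvTB ((xN : Nat) : Int) k ones i o)).sum) 0 0 ?hGB (by norm_num)]
  case hGB =>
    intro o ho t
    refine Eq.trans (foldl_mod_gen valid _ (fun i => pvTB ((xN : Nat) : Int) k ones i o)
      t (t % 1000000007) ?_ rfl) rfl
    intro i hi u
    by_cases hio : i < o
    · rw [if_pos hio]
      simp only [pvTB, if_pos hio]
      simp
    · rw [if_neg hio, Int.emod_add_emod]
      simp only [pvTB, if_neg hio]
  rw [foldl_mod_gen _ _ (fun i => if cou = i then (1:Int) else 0)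
      (0 + ((PySem.List.pyRange 0 (PySem.List.len ones)).map
        (fun o => (valid.map (fun i => pvTB ((xN : Nat) : Int) k ones i o)).sum)).sum)
      ((0 + ((PySem.List.pyRange 0 (PySem.List.len ones)).map
        (fun o => (valid.map (fun i => pvTB ((xN : Nat) : Int) k ones i o)).sum)).sum) % 1000000007)
      ?hbns rfl]
  case hbns =>
    intro i hi t
    dsimp only
    by_cases hcou : cou = i
    · rw [if_pos hcou, if_pos hcou, Int.emod_add_emod]
    · rw [if_neg hcou, if_neg hcou]
      simp
  rw [hsum]
  congr 1
  ring
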